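/- GENERATED by mk_final_copies.py from the proof of the farm's unit `start_decoder.C6c` (farm:start_decoder.C6c.1: Proof.lean) as the
   re-elaboration sweep compiled it — do not edit. -/
import Asan.CheckWalk
import Vorbis.Spec.Units.start_decoder_C6c
import Vorbis.Spec.Worked.start_decoder_C6c_Lemmas
import Vorbis.Spec.StartDecoderCarry
import Vorbis.Spec.StartDecoderC7

open X86 X86.User Asan Vorbis Vorbis.Spec Vorbis.Spec.StartDecoder

set_option maxRecDepth 100000
set_option maxHeartbeats 4000000

namespace Vorbis.Spec.start_decoder_C6c

/-- Segment C6c: from the return of `setup_malloc(f, sorted_entries)` (0x1148f3, `AtC6c`): the checked store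
`c->codeword_lengths = rax` (`C7.cb_site`; the invariant side is `c6c_carry` + `c6c_fields`), then NULL → the outofmem stub
(`error`, `AtERR` by `Cur.failed` on the carried CUR(i)), else the checked load of `sorted_entries` and
`setup_temp_malloc(f, 4·SE)` (`c6c_temp_call` / `c6c_temp_fail`), `AtC6d` by `c6c_build`. -/
theorem c6c_walk : Vorbis.Spec.start_decoder_C6c.Statement := by
  intro Lay hLay μ hμ u₀ hcode hld4 h_error hst8 h_tmalloc
  intro g i v hat
  obtain ⟨A, lengths, A2, A3, Ai, Aw, h⟩ := hat
  have hfr := h.mid.frame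
  have hhand := h.mid.cur.hand
  have he := hfr.entry
  v_entry he
  simp only [depth] at he_room he_stack
  have w_rip := hfr.rip
  have w_rsp := hfr.rsp
  have w_eq : Mem.EqOn Vorbis.L.textLo Vorbis.L.textHi u₀.mem v.mem := hfr.code
  have hdf : v.flags .df = false := (show abiInv _ from hfr.inv).1
  have hmx : v.mxcsr &&& 0x1F80 = 0x1F80 := (show abiInv _ from hfr.inv).2
  have hsse := Vorbis.sseOK_of_abiInv hfr.inv
  obtain ⟨hR1, hR2⟩ := hfr.r_eq
  have eR : g.R = (g.e.reg .rsp).toNat - 1480 := rfl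
  have eRA : g.RA = (g.e.reg .rsp).toNat := rfl
  have c_rsp : v.reg .rsp = g.e.reg .rsp - 1480 := by
    rw [w_rsp, eR, ← Vorbis.addr_sub_lit _ 1480 (by show (1480 : Nat) ≤ _; omega), Vorbis.addr_toNat]
  clear w_rsp
  have k_rsp := c_rsp
  -- the spill slot of `f`: qword [R + 18H]
  have r_f : v.mem.readLE (g.e.reg .rsp - 1456) 8 = g.f := by
    have e : g.e.reg .rsp - 1456 = addr (g.R + 0x18) := by
      have e1 : g.R + 0x18 = (g.e.reg .rsp).toNat - 1456 := by
        show (g.e.reg .rsp).toNat - 1480 + 0x18 = _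
        omega
      rw [e1, ← Vorbis.addr_sub_lit _ 1456 (by show (1456 : Nat) ≤ _; omega), Vorbis.addr_toNat]
    rw [e]
    exact h.mid.cur.slot_f
  have hpos : Pos g A := Pos.of hfr h.mid.cur
  have hm0 : MInv g i A2 A3 Ai A v.mem := MInv.of hfr h.mid.cur
  have hcw := hm0.c_where
  -- the `lengths` block of a sparse book: the temp block P1, above every setup block (the struct is in one)
  have hT := h.temps
  have hTl : A.1.TBlock lengths (Codebook.entries v.mem (g.cb v.mem i)).toNat := hT.tblock List.mem_cons_self
  have hlr := h.mid.cur.sd.arena.tblock_range hTl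
  have hlo' := h.mid.cur.sd.arena.tblock_off hTl
  have hr8 := le_r8 (Codebook.entries v.mem (g.cb v.mem i)).toNat
  have hab := h.mid.cur.sd.arena.bounds
  have hcbA : A.1.Blk (codebooksBlock v.mem g.f) := h.mid.cur.ages.cbOK.F2.mono h.mid.cur.ages.exti
  have hbr := h.mid.cur.sd.arena.block_range hcbA
  have hci := h.mid.cur.ages.cbOK.cb_in i h.mid.cur.lt
  simp only [vblock, voff] at hci hbr
  have hr8c := le_r8 (2120 * (stb_vorbis.codebook_count v.mem g.f).toNat)
  have hloff : g.cb v.mem i + 2120 ≤ lengths := by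
    unfold Ghost.cb
    omega
  obtain ⟨c, hc⟩ : ∃ c, g.cb v.mem i = c := ⟨_, rfl⟩
  have c_r14 := h.mid.cur.r14
  rw [hc] at c_r14 hcw hloff hT hTl hlr hlo' hr8
  have hcT : (addr c).toNat = c := Vorbis.toNat_addr _ (by omega)
  have hfT : (addr g.f).toNat = g.f := Vorbis.toNat_addr _ (by
    have := hpos.f_hi
    omega)
  have hsub : ∀ o, o ∈ stackObjs g.frames ++ A.2 → o ∈ stackObjs g.frames' ++ A.2 := by
    intro o ho
    unfold Ghost.frames'
    rw [stackObjs_cons]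
    rcases List.mem_append.mp ho with hs | ho'
    · exact List.mem_append_left _ (List.mem_append_right _ hs)
    · exact List.mem_append_right _ ho'
  have herr := h_error A.2 g.frames'
  have hText : 1154368 ≤ A.1.B := hhand.arenaText
  have t1 : (g.e.reg .rsp - 1488).toNat = (g.e.reg .rsp).toNat - 1488 := by u_omega
  have hfn : (UInt64.ofNat g.f).toNat = g.f := hfT
  obtain ⟨hf1, hf2, hf3⟩ := c6c_obj_where h.mid.cur hfr.shadow hfr.offText
  have p6 := hpos.f_stack
  have hk1 := h.mid.k1
  have hk2 := h.mid.k2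
  rw [hc] at hk1 hk2
  -- the load of `sorted_entries` (0x114918), named before the walk
  have r2112 : v.mem.readLE (addr c + 2112) 4 = (Codebook.sorted_entries v.mem c).toNat := by
    have h0 := hk2.se_nonneg
    simp only [vacc, voff] at h0 ⊢
    rw [Vorbis.addr_add_lit]
    exact v.mem.u32_of_i32_nonneg (c + 2112) h0
  -- STAGE 1: 0x1148f3 … 0x114918 (the return of the check of `c + 2112`), or the outofmem stub to the epilogue
  u_walk hcode [hμ.vendor] until [Vorbis.L.start_decoder.ret183, pc_ERR] span [Vorbis.L.textLo, Vorbis.L.textHi] side (v_side)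
  case check_1148fa =>
    have hun : ShadowUntouched v.mem s_1148fa.mem := by v_untouched
    have hsite := C7.cb_site h.mid.cur 8 8 (by omega) (by omega)
    rw [hc] at hsite
    apply Vorbis.Spec.check_site hfr.shadow hun hsite
    u_omega
  case check_114913 =>
    have hun : ShadowUntouched v.mem s_114913.mem := by v_untouched
    have hsite := C7.cb_site h.mid.cur 2112 4 (by omega) (by omega)
    rw [hc] at hsite
    apply Vorbis.Spec.check_site hfr.shadow hun hsite
    u_omega
  case call_inv => v_inv
  case pre_114999 =>
    have hun : ShadowUntouched v.mem s_114999.mem := by v_untouched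
    have hf' : (s_114999.reg .rdi).toNat = g.f := by
      rw [w_rdi]
      exact hfn
    have hrs : (s_114999.reg .rsp).toNat + 8 = g.R := by
      rw [w_rsp, t1]
      omega
    refine ⟨⟨?_, hfr.offText⟩, ?_⟩
    · rw [hrs]
      exact hfr.shadow.untouched hun
    · rw [hf']
      exact hhand.obj.mono hsub
  case cont =>
    -- 0x11499e: `error(f, VORBIS_outofmem)` returned (after the store of the NULL): the `jmp` to the epilogue
    have hsA : Mem.SameExcept [⟨g.R - 408, g.R⟩, ⟨c + 8, c + 16⟩] v.mem s_114999.mem := by u_same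
    have hunA : ShadowUntouched v.mem s_114999.mem := by v_untouched
    rw [w_mem_114999] at hsA hunA
    v_after_call w_rsp_114999 w_mem_114999
    have hf : (s_114999.reg .rdi).toNat = g.f := by
      rw [w_rdi_114999]
      exact hfn
    simp only [hf, t1] at w_same
    have hp : s_114999r.reg .rax = 0 ∧ ShadowUntouched s_114999.mem s_114999r.mem ∧
        s_114999r.mem.readLE (s_114999.reg .rdi + 140) 4 = (s_114999.reg .rsi).toNat % 2 ^ 32 := w_post
    have w_rax : s_114999r.reg .rax = 0 := hp.1
    have hun3 : ShadowUntouched s_114999.mem s_114999r.mem := hp.2.1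
    rw [w_mem_114999] at hun3
    have hsB : Mem.SameExcept [⟨g.R - 408, g.R⟩, ⟨c + 8, c + 16⟩, ⟨g.f + 140, g.f + 144⟩] v.mem s_114999r.mem := by
      refine (C7.sameExcept_weaken hsA ?_).trans (w_same.mono ?_)
      · intro w hw
        simp only [List.mem_cons, List.mem_nil_iff, or_false] at hw ⊢
        rcases hw with rfl | rfl
        · exact Or.inl rfl
        · exact Or.inr (Or.inl rfl)
      · intro w hw a h1 h2
        simp only [List.mem_cons, List.mem_nil_iff, or_false] at hw
        rcases hw with rfl | rfl
        · simp only [] at h1 h2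
          exact ⟨_, List.mem_cons_self, by simp only []; omega, by simp only []; omega⟩
        · simp only [] at h1 h2
          exact ⟨_, List.mem_cons_of_mem _ (List.mem_cons_of_mem _ List.mem_cons_self), by simp only []; omega,
            by simp only []; omega⟩
    have hunB : ShadowUntouched v.mem s_114999r.mem := Mem.EqOn.trans hunA hun3
    have hokB : ∀ w, w ∈ [(⟨g.R - 408, g.R⟩ : Span), ⟨c + 8, c + 16⟩, ⟨g.f + 140, g.f + 144⟩] →
        C6cWin g (g.cb v.mem i) 8 w := by
      intro w hw
      rw [hc]
      simp only [List.mem_cons, List.mem_nil_iff, or_false] at hw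
      unfold C6cWin
      rcases hw with rfl | rfl | rfl <;> simp only [] <;> omega
    u_walk hcode [hμ.vendor] until [Vorbis.L.start_decoder.ret183, pc_ERR] span [Vorbis.L.textLo, Vorbis.L.textHi] side (v_side)
    have hsC : Mem.SameExcept [⟨g.R - 408, g.R⟩, ⟨c + 8, c + 16⟩, ⟨g.f + 140, g.f + 144⟩] v.mem s_11499e.mem := by
      rw [w_mem]
      exact hsB
    have hunC : ShadowUntouched v.mem s_11499e.mem := by
      rw [w_mem]
      exact hunB
    have hinv' : abiInv s_11499e := by
      refine Vorbis.abiInv_of ?_ ?_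
      · rw [w_flags]
        exact w_df
      · rw [w_mxcsr]
        exact w_mx
    have hrsp' : s_11499e.reg .rsp = v.reg .rsp := by
      rw [w_rsp, c_rsp]
    obtain ⟨hfr', hcur', _, _, _⟩ := c6c_carry 8 (by omega) hfr h.mid.cur hsC hunC hokB w_rip hrsp' w_eq hinv'
      (w_kept.get .r14 rfl)
    apply ReachVia.done
    refine Or.inr ⟨A, hfr', hhand, Or.inl ⟨?_, hcur'.failed⟩⟩
    rw [w_rax]
    rfl
  -- STAGE 2: the state `s` = 0x114918 (the check of `c + 2112` returned): `InC6Mid` there, then the call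
  have hne : ¬ v.reg .rax = 0 := by
    intro h0
    rw [h0] at hbr_114906
    exact hbr_114906 rfl
  have hS : Since Aw A.1 ⟨(v.reg .rax).toNat, (Codebook.sorted_entries v.mem c).toNat⟩ := by
    rcases h.res with h0 | hS
    · exact absurd h0 hne
    · rw [hc] at hS
      exact hS
  have hsA : Mem.SameExcept [⟨g.R - 408, g.R⟩, ⟨c + 8, c + 16⟩] v.mem s_114913r.mem := by u_same
  have hunA : ShadowUntouched v.mem s_114913r.mem := by v_untouched
  have hokA : ∀ w, w ∈ [(⟨g.R - 408, g.R⟩ : Span), ⟨c + 8, c + 16⟩] → C6cWin g (g.cb v.mem i) 8 w := by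
    intro w hw
    rw [hc]
    simp only [List.mem_cons, List.mem_nil_iff, or_false] at hw
    unfold C6cWin
    rcases hw with rfl | rfl <;> simp only [] <;> omega
  have hrspS : s_114913r.reg .rsp = v.reg .rsp := by
    rw [w_rsp, c_rsp]
  have hinvS : abiInv s_114913r := by v_inv
  obtain ⟨hfrS, hcurS, hcbS, hlo, hhi⟩ := c6c_carry 8 (by omega) hfr h.mid.cur hsA hunA hokA w_rip hrspS w_eq hinvS
    (w_kept.get .r14 rfl)
  rw [hc] at hcbS hlo hhi
  obtain ⟨e_dim, e_ent, e_sp, e_se, hfresh⟩ := c6c_fields hlo hhi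
  -- the stored pointer
  have e_cl : Codebook.codeword_lengths s_114913r.mem c = (v.reg .rax).toNat := by
    simp only [vacc, voff]
    unfold Mem.u64
    rw [← Vorbis.addr_add_lit, w_mem]
    u_read
  -- the bytes of `lengths` are kept by the store and the pushes
  have p1 := hpos.r_eq
  have p2 := hpos.ra_lo
  have p3 := hpos.ra_hi
  have p7 := hpos.objOut
  have p10 := hpos.ar_hi
  have p11 := hpos.ar_stack
  have hlenE : Mem.EqOn lengths (lengths + (Codebook.entries v.mem c).toNat) v.mem s_114913r.mem := by
    apply hsA.eqOn
    intro w hw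
    simp only [List.mem_cons, List.mem_nil_iff, or_false] at hw
    rcases hw with rfl | rfl <;> simp only [] <;> omega
  have hlenI : lengths + (Codebook.entries v.mem c).toNat ≤ 2 ^ 64 := by omega
  have hsp1 := h.sparse1
  have hfr5 := h.mid.fresh
  have hlenL := h.mid.lenL
  have hcnt := h.cnt
  rw [hc] at hsp1 hfr5 hlenL hcnt
  have hmidS : InC6Mid u₀ g i A2 A3 Ai Aw A lengths 1132824 s_114913r :=
    { frame := hfrS
      cur := hcurS
      extw := h.mid.extw
      extw' := h.mid.extw'
      k1 := by
        rw [hcbS]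
        exact ⟨by rw [e_dim]; exact hk1.dim_pos, by rw [e_dim]; exact hk1.dim_le, by rw [e_ent]; exact hk1.ent_nonneg,
          by rw [e_ent]; exact hk1.ent_lt⟩
      k2 := by
        rw [hcbS]
        exact
          { sparse_01 := by rw [e_sp]; exact hk2.sparse_01
            se_nonneg := by rw [e_se]; exact hk2.se_nonneg
            se_le := by rw [e_se, e_ent]; exact hk2.se_le
            sparse_pos := by rw [e_sp, e_se]; exact hk2.sparse_pos
            sparse_quarter := by rw [e_sp, e_se, e_ent]; exact hk2.sparse_quarter }
      rbx := (w_kept.get .rbx rfl).trans h.mid.rbx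
      lenL := by rw [hcbS, e_ent]; exact hlenL.same hlenE hlenI
      fresh := by rw [hcbS]; exact hfresh hfr5 }
  have eES : (Codebook.entries s_114913r.mem (g.cb s_114913r.mem i)).toNat = (Codebook.entries v.mem c).toNat := by
    rw [hcbS, e_ent]
  have eSES : (Codebook.sorted_entries s_114913r.mem (g.cb s_114913r.mem i)).toNat =
      (Codebook.sorted_entries v.mem c).toNat := by
    rw [hcbS, e_se]
  have sparse1S : Codebook.sparse s_114913r.mem (g.cb s_114913r.mem i) = 1 := by
    rw [hcbS, e_sp]
    exact hsp1
  have slS : Since Aw A.1 ⟨Codebook.codeword_lengths s_114913r.mem (g.cb s_114913r.mem i),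
      (Codebook.sorted_entries s_114913r.mem (g.cb s_114913r.mem i)).toNat⟩ := by
    rw [hcbS, e_cl, e_se]
    exact hS
  have cntS : CNT s_114913r.mem lengths (g.cb s_114913r.mem i) := by
    unfold CNT at hcnt ⊢
    rw [hcbS, e_ent, e_se, C7.usedCount_same hlenE hlenI]
    exact hcnt
  have c_memS := w_mem
  have c_rspS := w_rsp
  have c_keptS := w_kept
  have hRS : (g.e.reg .rsp - 1488).toNat + 8 = g.R := by u_omega
  have htm := h_tmalloc A.2 g.frames' A.1
  try clear w_zmm
  u_walk hcode [hμ.vendor] until [Vorbis.L.start_decoder.cut131] span [Vorbis.L.textLo, Vorbis.L.textHi] side (v_side)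
  case call_inv => v_inv
  case pre_11492b =>
    have hmem1 : s_11492b.mem = s_114913r.mem.writeLE (g.e.reg .rsp - 1488) 8 1132848 := by
      rw [w_mem, c_memS, Mem.writeLE_writeLE_same _ _ 8 _ _ (by decide)]
    have hun : ShadowUntouched s_114913r.mem s_11492b.mem := by
      rw [hmem1]
      exact Mem.eqOn_writeLE _ _ 8 _ 0xC00000 0x200000 (by omega) (by omega)
    apply c6c_temp_pre hfrS hcurS hun
    · rw [hmem1]
      apply Mem.EqOn.writeLE
      · u_omega
      · u_omega
    · rw [w_rsp]
      u_omega
    · rw [w_rdi]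
      exact hfT
  -- 0x114930: setup_temp_malloc(f, 4·SE) returned
  have hE0 := hk1.ent_nonneg
  have hE1 := hk1.ent_lt
  have hSE0 := hk2.se_nonneg
  have hSE1 := hk2.se_le
  have ersi : (s_11492b.reg .rsi).toNat % 2 ^ 32 = 4 * (Codebook.sorted_entries v.mem c).toNat := by
    have e1 : (BitVec.ofNat 32 (Codebook.sorted_entries v.mem c).toNat).toNat = (Codebook.sorted_entries v.mem c).toNat :=
      toNat_ofNat32 _ (by omega)
    rw [w_rsi_11492b, c6c_lea4 _ (by rw [e1]; omega), e1]
    omega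
  have hmemS : s_11492b.mem = s_114913r.mem.writeLE (g.e.reg .rsp - 1488) 8 1132848 := by
    rw [w_mem_11492b, c_memS, Mem.writeLE_writeLE_same _ _ 8 _ _ (by decide)]
  simp only [X86.User.Spec.footprint, vspec] at w_same
  have e_sp' : (s_11492b.reg .rsp).toNat + 8 = g.R := by
    rw [w_rsp_11492b]
    exact hRS
  have e_rdi : (s_11492b.reg .rdi).toNat = g.f := by
    rw [w_rdi_11492b]
    exact hfT
  have hrspR : s_11492br.reg .rsp = s_114913r.reg .rsp := by
    rw [w_rsp, c_rspS]
  have hr14R : s_11492br.reg .r14 = s_114913r.reg .r14 :=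
    (w_kept.get .r14 rfl).trans (c_keptS.get .r14 rfl).symm
  have hrbxR : s_11492br.reg .rbx = s_114913r.reg .rbx :=
    (w_kept.get .rbx rfl).trans (c_keptS.get .rbx rfl).symm
  -- the bytes of the temp block P1 = `lengths` over the call (the push, then the callee's footprint: stack, `*f`, shadow)
  have hpushS : Mem.SameExcept [⟨g.R - 8, g.R⟩] s_114913r.mem s_11492b.mem := by
    rw [hmemS]
    apply Mem.SameExcept.writeLE
    · omega
    · refine ⟨_, List.mem_cons_self, ?_, ?_⟩
      · simp only []
        omega
      · simp only []
        omega
  have hlenK : (Block.mk lengths (Codebook.entries s_114913r.mem (g.cb s_114913r.mem i)).toNat).Kept s_114913r.mem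
      s_11492br.mem := by
    rw [eES]
    refine (Block.Kept.of_sameExcept hpushS ?_ (by simp only []; omega)).trans
      (Block.Kept.of_sameExcept w_same ?_ (by simp only []; omega))
    · intro w hw
      rw [List.mem_singleton.mp hw]
      simp only []
      omega
    · intro w hw
      simp only [List.mem_cons, List.mem_nil_iff, or_false] at hw
      rcases hw with rfl | rfl | rfl
      · simp only []
        omega
      · simp only []
        omega
      · unfold shadowSpan
        simp only []
        omega
  have tempsS : TempsAre A.1 [(lengths, (Codebook.entries s_114913r.mem (g.cb s_114913r.mem i)).toNat)] := by
    rw [eES]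
    exact hT
  by_cases hfit : A.1.Fits ((s_11492b.reg .rsi).toNat % 2 ^ 32)
  · -- the request fits: the new temp block P2 on top of P1
    obtain ⟨r1, r2, r3, r4', r5⟩ := c6c_temp_call hfrS hcurS hmemS hRS e_sp' e_rdi w_same w_post hfit w_rip hrspR
      (Vorbis.conv_code_eqOn w_code) w_inv hr14R
    apply ReachVia.done
    refine Or.inl ⟨(A.1.pushTemp ((s_11492b.reg .rsi).toNat % 2 ^ 32),
      A.1.newTempObj ((s_11492b.reg .rsi).toNat % 2 ^ 32) :: A.2), lengths, A2, A3, Ai, Aw, ?_⟩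
    refine c6c_build hmidS sparse1S slS cntS r1 r2 r3 r4' (A.1.extends_pushTemp _) hrbxR hlenK (Or.inr ?_)
    exact c6c_temps_push tempsS r5 (by rw [eSES, ersi])
  · -- the request does not fit: NULL, the same ghost
    obtain ⟨r1, r2, r3, r4', r5, _⟩ := c6c_temp_fail hfrS hcurS hmemS hRS e_sp' e_rdi w_post hfit w_rip hrspR
      (Vorbis.conv_code_eqOn w_code) w_inv hr14R
    apply ReachVia.done
    exact Or.inl ⟨A, lengths, A2, A3, Ai, Aw,
      c6c_build hmidS sparse1S slS cntS r1 r2 r3 r4' (Arena.Extends.refl _) hrbxR hlenK (Or.inl r5)⟩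

end Vorbis.Spec.start_decoder_C6c

theorem Vorbis.Spec.Worked.start_decoder_C6c_ok : Vorbis.Spec.start_decoder_C6c.Statement := Vorbis.Spec.start_decoder_C6c.c6c_walk
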